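-- pv_equiv track=rewrite | github.com/AlexD796/IP-2C2024 | Python/Parciales/parcialPyhton1C2024.py | racha_mas_larga
-- ===== SOURCE A (Python) =====
-- def racha_mas_larga (tiempos: list[int])-> tuple[int,int]:
--     racha:int=0
--     mayor_racha:int=0
--     index:int=0
--
--     for i in range (len(tiempos)):
--         if 0 < tiempos[i] < 61:
--             racha+=1
--         else:
--             racha=0
--
--         if racha > mayor_racha:
--            mayor_racha = racha
--            index = i - mayor_racha + 1
--
--     return (index, index + mayor_racha - 1)
-- ===== SOURCE B (Python) =====
-- def racha_mas_larga(tiempos: list[int]) -> tuple[int, int]: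
--     # Build every maximal run of values in (0,61) as (start, length), then pick
--     # the first longest one; (0, -1) when there is no qualifying run.
--     segmentos = []
--     inicio = None
--     for i, t in enumerate(tiempos):
--         if 0 < t < 61:
--             if inicio is None:
--                 inicio = i
--         else:
--             if inicio is not None:
--                 segmentos.append((inicio, i - inicio))
--                 inicio = None
--     if inicio is not None:
--         segmentos.append((inicio, len(tiempos) - inicio))
--     if not segmentos:
--         return (0, -1)
--     s, l = max(segmentos, key=lambda seg: seg[1])
--     return (s, s + l - 1)
-- ===== Notes on version B (the rewrite author's own statement) =====
-- stated objective: alternative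
-- what changed: Replaces A's online running-max over a streamed counter with a build-all-maximal-segments pass followed by a first-longest max(key) selection.
import Mathlib
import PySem

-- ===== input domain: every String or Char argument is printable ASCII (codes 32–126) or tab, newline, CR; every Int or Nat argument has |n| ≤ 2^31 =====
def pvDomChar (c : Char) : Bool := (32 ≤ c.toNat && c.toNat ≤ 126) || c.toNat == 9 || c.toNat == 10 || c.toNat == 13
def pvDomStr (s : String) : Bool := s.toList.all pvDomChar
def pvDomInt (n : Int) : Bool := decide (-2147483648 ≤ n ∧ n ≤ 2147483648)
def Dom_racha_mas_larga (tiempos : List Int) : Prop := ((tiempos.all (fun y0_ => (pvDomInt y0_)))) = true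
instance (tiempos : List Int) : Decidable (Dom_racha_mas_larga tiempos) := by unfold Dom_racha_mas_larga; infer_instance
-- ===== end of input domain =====

-- B replaces A's online running-max with a collect-all-maximal-segments pass plus a
-- first-longest max(key) selection: a different decomposition, same O(n) cost.

-- ===== PORT A =====
-- one iteration of A's for-loop body; state = (racha, mayor_racha, index)
def rachaStepA (tiempos : List Int) (st : Int × Int × Int) (i : Int) : Int × Int × Int :=
  let t := PySem.List.pyGetD tiempos i 0
  let racha := if 0 < t ∧ t < 61 then st.1 + 1 else 0
  if st.2.1 < racha then (racha, racha, i - racha + 1) else (racha, st.2.1, st.2.2)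

def racha_mas_larga (tiempos : List Int) : Int × Int :=
  let st := (PySem.List.pyRange 0 (tiempos.length : Int) 1).foldl (rachaStepA tiempos) (0, 0, 0)
  (st.2.2, st.2.2 + st.2.1 - 1)

-- ===== PORT B =====
-- one iteration of B's for-loop body; state = (segmentos, inicio)
def segStep (st : List (Int × Int) × Option Int) (p : Int × Int) : List (Int × Int) × Option Int :=
  if 0 < p.2 ∧ p.2 < 61 then
    match st.2 with
    | none => (st.1, some p.1)
    | some s => (st.1, some s)
  else
    match st.2 with
    | some s => (st.1 ++ [(s, p.1 - s)], none)
    | none => (st.1, none)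

def racha_mas_larga_alt (tiempos : List Int) : Int × Int :=
  let st := (PySem.List.enumerate tiempos).foldl segStep ([], none)
  let segs :=
    match st.2 with
    | some s => st.1 ++ [(s, (tiempos.length : Int) - s)]
    | none => st.1
  if segs.isEmpty then (0, -1)
  else
    let m := PySem.List.maxD segs (fun p => p.2) (0, 0)
    (m.1, m.1 + m.2 - 1)

-- ===== PRECONDITION & SPEC =====
def Spec_racha_mas_larga (tiempos : List Int) (out : Int × Int) : Prop := out = racha_mas_larga_alt tiempos
instance (tiempos : List Int) (out : Int × Int) : Decidable (Spec_racha_mas_larga tiempos out) := by unfold Spec_racha_mas_larga; infer_instance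

-- ===== CLAIM (what is proved, stated in full; the proofs are below) =====
def Claim_equal_racha_mas_larga : Prop := ∀ (tiempos : List Int), Dom_racha_mas_larga tiempos → Spec_racha_mas_larga tiempos (racha_mas_larga tiempos)

-- ===== LEMMAS AND PROOFS =====

-- A's running-max step on a (start, length) candidate, and the best segment seen so far
def bestStep (b p : Int × Int) : Int × Int := if b.2 < p.2 then p else b
def bestF (segs : List (Int × Int)) : Int × Int := segs.foldl bestStep (0, 0)

-- A's loop body rephrased on an (index, value) pair
def stepAE (st : Int × Int × Int) (p : Int × Int) : Int × Int × Int :=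
  let racha := if 0 < p.2 ∧ p.2 < 61 then st.1 + 1 else 0
  if st.2.1 < racha then (racha, racha, p.1 - racha + 1) else (racha, st.2.1, st.2.2)

lemma snd_le_foldl_bestStep (l : List (Int × Int)) (b : Int × Int) :
    b.2 ≤ (l.foldl bestStep b).2 := by
  induction l generalizing b with
  | nil => simp
  | cons p l ih =>
    simp only [List.foldl_cons]
    refine le_trans ?_ (ih (bestStep b p))
    unfold bestStep; split_ifs with h <;> omega

lemma bestF_concat (segs : List (Int × Int)) (q : Int × Int) :
    bestF (segs ++ [q]) = bestStep (bestF segs) q := by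
  simp [bestF, List.foldl_append]

lemma enum_concat {α : Type} (xs : List α) (x : α) (s : Int) :
    PySem.List.enumerate (xs ++ [x]) s
      = PySem.List.enumerate xs s ++ [(s + (xs.length : Int), x)] := by
  induction xs generalizing s with
  | nil => simp [PySem.List.enumerate, PySem.List.enumerate_cons]
  | cons y ys ih =>
    have harith : s + ((ys.length : Nat) + 1 : Nat) = (s + 1) + (ys.length : Int) := by
      push_cast; ring
    rw [List.cons_append, PySem.List.enumerate_cons, ih, List.length_cons, harith,
        PySem.List.enumerate_cons, List.cons_append]

lemma foldA_bridge (xs : List Int) (init : Int × Int × Int) :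
    (PySem.List.pyRange 0 (xs.length : Int) 1).foldl (rachaStepA xs) init
      = (PySem.List.enumerate xs).foldl stepAE init := by
  induction xs using List.reverseRecOn generalizing init with
  | nil => simp [PySem.List.pyRange_one_eq_nil, PySem.List.enumerate]
  | append_singleton ys y ih =>
    have hlen : ((ys ++ [y]).length : Int) = (ys.length : Int) + 1 := by
      simp
    rw [hlen, PySem.List.pyRange_one_succ_right (Int.natCast_nonneg _), List.foldl_append,
        enum_concat, List.foldl_append]
    have hpref : (PySem.List.pyRange 0 (ys.length : Int) 1).foldl (rachaStepA (ys ++ [y])) init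
        = (PySem.List.pyRange 0 (ys.length : Int) 1).foldl (rachaStepA ys) init := by
      apply PySem.List.foldl_congr_mem
      intro acc i hi
      rw [PySem.List.mem_pyRange_one] at hi
      have hget : PySem.List.pyGetD (ys ++ [y]) i 0 = PySem.List.pyGetD ys i 0 := by
        rw [PySem.List.pyGetD_eq_getElem _ 0 hi.1 (by simp; omega),
            PySem.List.pyGetD_eq_getElem _ 0 hi.1 (by exact_mod_cast hi.2)]
        exact List.getElem_append_left (by omega)
      simp only [rachaStepA, hget]
    rw [hpref, ih]
    have hgety : PySem.List.pyGetD (ys ++ [y]) ((ys.length : Int)) 0 = y := by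
      rw [PySem.List.pyGetD_eq_getElem _ 0 (Int.natCast_nonneg _) (by simp)]
      simp
    simp only [List.foldl_cons, List.foldl_nil, rachaStepA, stepAE, hgety, Int.zero_add]

-- the loop invariant linking A's state to B's state after the same prefix
def RInv (i : Int) (a : Int × Int × Int) (b : List (Int × Int) × Option Int) : Prop :=
  (∀ p ∈ b.1, 0 < p.2) ∧
  (b.2 = none → a.1 = 0 ∧ (a.2.2, a.2.1) = bestF b.1) ∧
  (∀ s, b.2 = some s → a.1 = i - s ∧ 0 < a.1 ∧ (a.2.2, a.2.1) = bestF (b.1 ++ [(s, i - s)]))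

lemma inv_step (i : Int) (a : Int × Int × Int) (b : List (Int × Int) × Option Int) (x : Int)
    (h : RInv i a b) : RInv (i + 1) (stepAE a (i, x)) (segStep b (i, x)) := by
  obtain ⟨r, m, idx⟩ := a
  obtain ⟨segs, st⟩ := b
  obtain ⟨hpos, hnone, hsome⟩ := h
  by_cases hc : 0 < x ∧ x < 61
  · cases st with
    | none =>
      obtain ⟨hr, hbest⟩ := hnone rfl
      subst hr
      have hidx : idx = (bestF segs).1 := congrArg Prod.fst hbest
      have hm : m = (bestF segs).2 := congrArg Prod.snd hbest
      have hseg : segStep (segs, none) (i, x) = (segs, some i) := by simp [segStep, hc]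
      rw [hseg]
      refine ⟨hpos, by simp, ?_⟩
      intro s hs
      obtain rfl : i = s := by simpa using hs
      refine ⟨?_, ?_, ?_⟩
      · simp only [stepAE, hc, and_self, if_true]
        split_ifs <;> simp
      · simp only [stepAE, hc, and_self, if_true]
        split_ifs <;> simp
      · rw [bestF_concat]
        rcases hbb : bestF segs with ⟨b1, b2⟩
        rw [hbb] at hidx hm
        simp only [stepAE, bestStep, hc, and_self, if_true]
        split_ifs <;> simp only [Prod.mk.injEq] <;> omega
    | some s0 =>
      obtain ⟨hr, hrpos, hbest⟩ := hsome s0 rfl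
      rw [bestF_concat] at hbest
      have hseg : segStep (segs, some s0) (i, x) = (segs, some s0) := by simp [segStep, hc]
      rw [hseg]
      refine ⟨hpos, by simp, ?_⟩
      intro s hs
      obtain rfl : s0 = s := by simpa using hs
      refine ⟨?_, ?_, ?_⟩
      · simp only [stepAE, hc, and_self, if_true]
        split_ifs <;> simp <;> omega
      · simp only [stepAE, hc, and_self, if_true]
        split_ifs <;> simp <;> omega
      · rw [bestF_concat]
        rcases hbb : bestF segs with ⟨b1, b2⟩
        rw [hbb] at hbest
        simp only [stepAE, bestStep, hc, and_self, if_true] at hbest ⊢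
        split_ifs at hbest ⊢ <;>
          simp only [Prod.mk.injEq] at hbest ⊢ <;>
          omega
  · cases st with
    | none =>
      obtain ⟨hr, hbest⟩ := hnone rfl
      subst hr
      have hm : m = (bestF segs).2 := congrArg Prod.snd hbest
      have hm0 : (0 : Int) ≤ (bestF segs).2 := snd_le_foldl_bestStep segs (0, 0)
      have hseg : segStep (segs, none) (i, x) = (segs, none) := by simp [segStep, hc]
      rw [hseg]
      refine ⟨hpos, ?_, by simp⟩
      intro _
      simp only [stepAE, hc, if_false]
      split_ifs with h1
      · omega
      · exact ⟨rfl, hbest⟩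
    | some s0 =>
      obtain ⟨hr, hrpos, hbest⟩ := hsome s0 rfl
      have hm : m = (bestF (segs ++ [(s0, i - s0)])).2 := congrArg Prod.snd hbest
      have hm0 : (0 : Int) ≤ (bestF (segs ++ [(s0, i - s0)])).2 :=
        snd_le_foldl_bestStep _ (0, 0)
      have hseg : segStep (segs, some s0) (i, x) = (segs ++ [(s0, i - s0)], none) := by
        simp [segStep, hc]
      rw [hseg]
      refine ⟨?_, ?_, by simp⟩
      · intro p hp
        rcases List.mem_append.1 hp with h1 | h1
        · exact hpos p h1
        · simp only [List.mem_singleton] at h1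
          subst h1
          simp only
          omega
      · intro _
        simp only [stepAE, hc, if_false]
        split_ifs with h1
        · omega
        · exact ⟨rfl, hbest⟩

lemma inv_fold (xs : List Int) : ∀ (i : Int) (a : Int × Int × Int) (b : List (Int × Int) × Option Int),
    RInv i a b →
    RInv (i + (xs.length : Int)) ((PySem.List.enumerate xs i).foldl stepAE a)
      ((PySem.List.enumerate xs i).foldl segStep b) := by
  induction xs with
  | nil => intro i a b h; simpa [PySem.List.enumerate] using h
  | cons x xs ih =>
    intro i a b h
    rw [PySem.List.enumerate_cons]
    simp only [List.foldl_cons]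
    have := ih (i + 1) _ _ (inv_step i a b x h)
    have harith : i + 1 + (xs.length : Int) = i + ((x :: xs).length : Int) := by push_cast [List.length_cons]; omega
    rwa [harith] at this

lemma max?_cons_eq (l : List (Int × Int)) : ∀ q : Int × Int,
    PySem.List.max? (q :: l) (fun p => p.2) = some (l.foldl bestStep q) := by
  induction l with
  | nil => intro q; rfl
  | cons r l ih =>
    intro q
    have h1 : PySem.List.max? (q :: r :: l) (fun p => p.2)
        = PySem.List.max? (bestStep q r :: l) (fun p => p.2) := by
      simp only [PySem.List.max?, List.foldl_cons]
      congr 1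
      unfold bestStep
      split_ifs <;> rfl
    rw [h1, ih, List.foldl_cons]

lemma maxD_eq_bestF (p : Int × Int) (rest : List (Int × Int))
    (hpos : ∀ q ∈ p :: rest, 0 < q.2) :
    PySem.List.maxD (p :: rest) (fun q => q.2) ((0 : Int), (0 : Int)) = bestF (p :: rest) := by
  have h0 : (0 : Int) < p.2 := hpos p (by simp)
  have hb0 : bestStep ((0 : Int), (0 : Int)) p = p := by
    unfold bestStep; simp [h0]
  rw [PySem.List.maxD, max?_cons_eq, Option.getD_some, bestF, List.foldl_cons, hb0]

-- ===== VERDICT (by name: the statement is the Claim_ definition above) =====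
theorem racha_mas_larga_spec : Claim_equal_racha_mas_larga := by
  intro tiempos _
  unfold Spec_racha_mas_larga
  simp only [racha_mas_larga, racha_mas_larga_alt]
  rw [foldA_bridge]
  have h0 : RInv 0 ((0 : Int), (0 : Int), (0 : Int)) ([], none) := by
    refine ⟨by simp, fun _ => ⟨rfl, rfl⟩, fun s hs => by simp at hs⟩
  have h := inv_fold tiempos 0 (0, 0, 0) ([], none) h0
  rw [zero_add] at h
  obtain ⟨hpos, hnone, hsome⟩ := h
  set stA := (PySem.List.enumerate tiempos 0).foldl stepAE (0, 0, 0) with hstA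
  set stB := (PySem.List.enumerate tiempos 0).foldl segStep ([], none) with hstB
  cases hcase : stB.2 with
  | none =>
    obtain ⟨hr, hbest⟩ := hnone hcase
    simp only []
    cases hsegs : stB.1 with
    | nil =>
      rw [hsegs] at hbest
      simp only [bestF, List.foldl_nil] at hbest
      have hidx : stA.2.2 = 0 := congrArg Prod.fst hbest
      have hm : stA.2.1 = 0 := congrArg Prod.snd hbest
      rw [hidx, hm]
      norm_num
    | cons p rest =>
      rw [hsegs] at hbest hpos
      have hne : ((p :: rest : List (Int × Int)).isEmpty) = false := rfl
      simp only [hne, if_false, Bool.false_eq_true]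
      rw [maxD_eq_bestF p rest hpos, ← hbest]
  | some s =>
    obtain ⟨hr, hrpos, hbest⟩ := hsome s hcase
    simp only []
    cases hsegs : stB.1 ++ [(s, (tiempos.length : Int) - s)] with
    | nil => simp at hsegs
    | cons p rest =>
      rw [hsegs] at hbest
      have hpos' : ∀ q ∈ p :: rest, 0 < q.2 := by
        rw [← hsegs]
        intro q hq
        rcases List.mem_append.1 hq with h1 | h1
        · exact hpos q h1
        · simp at h1; subst h1; simpa [← hr] using hrpos
      have hne : ((p :: rest : List (Int × Int)).isEmpty) = false := rfl
      simp only [hne, if_false, Bool.false_eq_true]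
      rw [maxD_eq_bestF p rest hpos', ← hbest]
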